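-- pv_equiv track=rewrite | github.com/zihuaweng/leetcode-solutions | leetcode_python/835.Image_Overlap.py | largestOverlap
-- ===== SOURCE A (Python) =====
-- from typing import List
--
-- import collections
--
-- def largestOverlap(A: List[List[int]], B: List[List[int]]) -> int:
--     a = list()
--     b = list()
--     d = collections.defaultdict(int)
--
--     rows = len(A)
--     cols = len(A[0])
--
--     for i in range(rows):
--         for j in range(cols):
--             if A[i][j] == 1:
--                 a.append((i, j))
--             if B[i][j] == 1:
--                 b.append((i, j))
--
--     res = 0
--     for x, y in a:
--         for i, j in b:
--             d[(x - i, y - j)] += 1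
--             res = max(res, d[(x - i, y - j)])
--     return res
-- ===== SOURCE B (Python) =====
-- from typing import List
--
--
-- def largestOverlap(A: List[List[int]], B: List[List[int]]) -> int:
--     # Shift-enumeration: try every translation (dx, dy) and count matching ones directly.
--     rows = len(A)
--     cols = len(A[0])
--     best = 0
--     for dx in range(-(rows - 1), rows):
--         for dy in range(-(cols - 1), cols):
--             cnt = 0
--             for x in range(rows):
--                 for y in range(cols):
--                     if A[x][y] == 1:
--                         i = x - dx
--                         j = y - dy
--                         if 0 <= i < rows and 0 <= j < cols and B[i][j] == 1:
--                             cnt += 1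
--             best = max(best, cnt)
--     return best
-- ===== Notes on version B (the rewrite author's own statement) =====
-- stated objective: alternative
-- what changed: Replaces A's offset histogram accumulated over all pairs of ones (with a running max over defaultdict counts) by a direct enumeration of every shift (dx, dy), counting the overlapping ones per shift with a grid scan and taking the maximum.
import Mathlib
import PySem

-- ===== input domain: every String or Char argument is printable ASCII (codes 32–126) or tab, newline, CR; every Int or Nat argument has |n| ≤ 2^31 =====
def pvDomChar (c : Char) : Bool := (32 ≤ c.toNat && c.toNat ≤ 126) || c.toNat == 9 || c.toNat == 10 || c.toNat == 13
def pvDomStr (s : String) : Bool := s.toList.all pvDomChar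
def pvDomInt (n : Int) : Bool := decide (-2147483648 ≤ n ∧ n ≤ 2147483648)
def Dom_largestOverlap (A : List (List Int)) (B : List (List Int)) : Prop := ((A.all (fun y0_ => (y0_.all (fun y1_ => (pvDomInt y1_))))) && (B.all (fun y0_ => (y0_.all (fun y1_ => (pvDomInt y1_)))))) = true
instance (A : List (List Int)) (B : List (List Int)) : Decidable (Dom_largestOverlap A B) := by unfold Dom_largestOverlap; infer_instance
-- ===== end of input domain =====

-- B replaces A's offset-histogram over pairs of ones by a direct scan over every shift (dx,dy),
-- counting overlapping ones per shift and taking the maximum; return value proved equal on Pre_.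

-- ===== PORT A =====
def largestOverlap (A : List (List Int)) (B : List (List Int)) : Int :=
  let rows : Int := (A.length : Int)
  let cols : Int := (((PySem.List.pyGet? A 0).getD []).length : Int)
  let ab := (PySem.List.pyRange 0 rows 1).foldl (fun (ab : List (Int × Int) × List (Int × Int)) i =>
      (PySem.List.pyRange 0 cols 1).foldl (fun (ab : List (Int × Int) × List (Int × Int)) j =>
        let ab1 := if PySem.List.pyGetD (PySem.List.pyGetD A i []) j 0 = 1 then (ab.1 ++ [(i, j)], ab.2) else ab
        if PySem.List.pyGetD (PySem.List.pyGetD B i []) j 0 = 1 then (ab1.1, ab1.2 ++ [(i, j)]) else ab1) ab)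
    ([], [])
  let rd := ab.1.foldl (fun (rd : Int × PySem.Dict (Int × Int) Int) p =>
      ab.2.foldl (fun (rd : Int × PySem.Dict (Int × Int) Int) q =>
        let k := (p.1 - q.1, p.2 - q.2)
        let d := rd.2.insert k (rd.2.getD k 0 + 1)
        (max rd.1 (d.getD k 0), d)) rd) (0, PySem.Dict.empty)
  rd.1

-- ===== PORT B =====
def largestOverlap_alt (A : List (List Int)) (B : List (List Int)) : Int :=
  let rows : Int := (A.length : Int)
  let cols : Int := (((PySem.List.pyGet? A 0).getD []).length : Int)
  (PySem.List.pyRange (-(rows - 1)) rows 1).foldl (fun best dx =>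
    (PySem.List.pyRange (-(cols - 1)) cols 1).foldl (fun best dy =>
      let cnt := (PySem.List.pyRange 0 rows 1).foldl (fun cnt x =>
        (PySem.List.pyRange 0 cols 1).foldl (fun cnt y =>
          if PySem.List.pyGetD (PySem.List.pyGetD A x []) y 0 = 1 then
            if 0 ≤ x - dx ∧ x - dx < rows ∧ 0 ≤ y - dy ∧ y - dy < cols ∧
                PySem.List.pyGetD (PySem.List.pyGetD B (x - dx) []) (y - dy) 0 = 1 then cnt + 1
            else cnt
          else cnt) cnt) 0
      max best cnt) best) 0

-- ===== PRECONDITION & SPEC =====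
-- Pre_ excludes exactly the inputs on which the Python A raises IndexError: an empty A
-- (len(A[0])), a row of A or of the used part of B shorter than len(A[0]), or B shorter
-- than A (all only reachable when len(A[0]) > 0).
def Pre_largestOverlap (A : List (List Int)) (B : List (List Int)) : Prop :=
  A ≠ [] ∧ (A.headI.length = 0 ∨
    ((∀ r ∈ A, A.headI.length ≤ r.length) ∧ A.length ≤ B.length ∧
      ∀ r ∈ B.take A.length, A.headI.length ≤ r.length))
instance (A : List (List Int)) (B : List (List Int)) : Decidable (Pre_largestOverlap A B) := by
  unfold Pre_largestOverlap; infer_instance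
def pvWitness_largestOverlap : List (List Int) × List (List Int) :=
  ([[1, 1, 0], [0, 1, 0], [0, 1, 0]], [[0, 0, 0], [0, 1, 1], [0, 0, 1]])
def Spec_largestOverlap (A : List (List Int)) (B : List (List Int)) (out : Int) : Prop := out = largestOverlap_alt A B
instance (A : List (List Int)) (B : List (List Int)) (out : Int) : Decidable (Spec_largestOverlap A B out) := by unfold Spec_largestOverlap; infer_instance

-- ===== CLAIM (what is proved, stated in full; the proofs are below) =====
def Claim_equal_largestOverlap : Prop := ∀ (A : List (List Int)) (B : List (List Int)), Dom_largestOverlap A B → Pre_largestOverlap A B → Spec_largestOverlap A B (largestOverlap A B)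

-- ===== LEMMAS AND PROOFS =====

def ovVal (M : List (List Int)) (i j : Int) : Int :=
  PySem.List.pyGetD (PySem.List.pyGetD M i []) j 0

-- all grid coordinates, row-major
def ovCells (rows cols : Int) : List (Int × Int) :=
  (PySem.List.pyRange 0 rows 1).flatMap
    (fun i => (PySem.List.pyRange 0 cols 1).map (fun j => (i, j)))

-- coordinates of the ones of M, row-major (A's lists `a` / `b`)
def ovOnes (M : List (List Int)) (rows cols : Int) : List (Int × Int) :=
  (ovCells rows cols).filter (fun p => ovVal M p.1 p.2 == 1)

-- the offsets A's second loop feeds to the histogram, in order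
def ovL (Aa Bb : List (List Int)) (rows cols : Int) : List (Int × Int) :=
  (ovOnes Aa rows cols).flatMap
    (fun p => (ovOnes Bb rows cols).map (fun q => (p.1 - q.1, p.2 - q.2)))

-- the shift grid B enumerates
def ovGrid (rows cols : Int) : List (Int × Int) :=
  (PySem.List.pyRange (-(rows - 1)) rows 1).flatMap
    (fun dx => (PySem.List.pyRange (-(cols - 1)) cols 1).map (fun dy => (dx, dy)))

-- the successive values `d[k]` takes in A's second loop
def ovIncs : List (Int × Int) → List (Int × Int) → List Int
  | _, [] => []
  | seen, k :: rest => ((seen.count k : Int) + 1) :: ovIncs (seen ++ [k]) rest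

lemma mem_ovCells {rows cols : Int} {p : Int × Int} :
    p ∈ ovCells rows cols ↔ 0 ≤ p.1 ∧ p.1 < rows ∧ 0 ≤ p.2 ∧ p.2 < cols := by
  obtain ⟨a, b⟩ := p
  simp [ovCells, List.mem_flatMap, PySem.List.mem_pyRange_one]
  tauto

lemma nodup_ovCells (rows cols : Int) : (ovCells rows cols).Nodup := by
  apply List.nodup_flatMap.mpr
  constructor
  · intro x _
    exact (PySem.List.nodup_pyRange_one 0 cols).map (by intro a b h; simpa using h)
  · apply List.Pairwise.imp ?_ (PySem.List.nodup_pyRange_one 0 rows)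
    intro a b hab
    simp only [List.Disjoint]
    rintro ⟨x, y⟩ hx hy
    simp only [List.mem_map] at hx hy
    obtain ⟨j1, _, h1⟩ := hx
    obtain ⟨j2, _, h2⟩ := hy
    exact hab ((congrArg Prod.fst h1).trans (congrArg Prod.fst h2).symm)

lemma mem_ovOnes {M : List (List Int)} {rows cols : Int} {p : Int × Int} :
    p ∈ ovOnes M rows cols ↔
      0 ≤ p.1 ∧ p.1 < rows ∧ 0 ≤ p.2 ∧ p.2 < cols ∧ ovVal M p.1 p.2 = 1 := by
  simp [ovOnes, List.mem_filter, mem_ovCells]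
  tauto

lemma loopA_inner (Aa Bb : List (List Int)) (i : Int) (js : List Int)
    (u v : List (Int × Int)) :
    js.foldl (fun (ab : List (Int × Int) × List (Int × Int)) j =>
        let ab1 := if PySem.List.pyGetD (PySem.List.pyGetD Aa i []) j 0 = 1 then (ab.1 ++ [(i, j)], ab.2) else ab
        if PySem.List.pyGetD (PySem.List.pyGetD Bb i []) j 0 = 1 then (ab1.1, ab1.2 ++ [(i, j)]) else ab1) (u, v)
    = (u ++ (js.map (fun j => (i, j))).filter (fun p => ovVal Aa p.1 p.2 == 1),
       v ++ (js.map (fun j => (i, j))).filter (fun p => ovVal Bb p.1 p.2 == 1)) := by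
  induction js generalizing u v with
  | nil => simp
  | cons j t ih =>
    simp only [List.foldl_cons, List.map_cons, List.filter_cons]
    by_cases hA : PySem.List.pyGetD (PySem.List.pyGetD Aa i []) j 0 = 1 <;>
      by_cases hB : PySem.List.pyGetD (PySem.List.pyGetD Bb i []) j 0 = 1 <;>
      simp [hA, hB, ovVal, ih]

lemma loopA_phase1 (Aa Bb : List (List Int)) (rows cols : Int) :
    (PySem.List.pyRange 0 rows 1).foldl (fun (ab : List (Int × Int) × List (Int × Int)) i =>
      (PySem.List.pyRange 0 cols 1).foldl (fun (ab : List (Int × Int) × List (Int × Int)) j =>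
        let ab1 := if PySem.List.pyGetD (PySem.List.pyGetD Aa i []) j 0 = 1 then (ab.1 ++ [(i, j)], ab.2) else ab
        if PySem.List.pyGetD (PySem.List.pyGetD Bb i []) j 0 = 1 then (ab1.1, ab1.2 ++ [(i, j)]) else ab1) ab)
      ([], [])
    = (ovOnes Aa rows cols, ovOnes Bb rows cols) := by
  have key : ∀ (is : List Int) (u v : List (Int × Int)),
      is.foldl (fun (ab : List (Int × Int) × List (Int × Int)) i =>
        (PySem.List.pyRange 0 cols 1).foldl (fun (ab : List (Int × Int) × List (Int × Int)) j =>
          let ab1 := if PySem.List.pyGetD (PySem.List.pyGetD Aa i []) j 0 = 1 then (ab.1 ++ [(i, j)], ab.2) else ab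
          if PySem.List.pyGetD (PySem.List.pyGetD Bb i []) j 0 = 1 then (ab1.1, ab1.2 ++ [(i, j)]) else ab1) ab) (u, v)
      = (u ++ is.flatMap (fun i => ((PySem.List.pyRange 0 cols 1).map (fun j => (i, j))).filter
            (fun p => ovVal Aa p.1 p.2 == 1)),
         v ++ is.flatMap (fun i => ((PySem.List.pyRange 0 cols 1).map (fun j => (i, j))).filter
            (fun p => ovVal Bb p.1 p.2 == 1))) := by
    intro is
    induction is with
    | nil => simp
    | cons i t ih =>
      intro u v
      simp only [List.foldl_cons, loopA_inner, ih, List.flatMap_cons, List.append_assoc]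
  rw [key]
  simp [ovOnes, ovCells, List.filter_flatMap]

lemma loopA2_flat (a b : List (Int × Int)) (rd0 : Int × PySem.Dict (Int × Int) Int) :
    a.foldl (fun rd p =>
      b.foldl (fun (rd : Int × PySem.Dict (Int × Int) Int) q =>
        let k := (p.1 - q.1, p.2 - q.2)
        let d := rd.2.insert k (rd.2.getD k 0 + 1)
        (max rd.1 (d.getD k 0), d)) rd) rd0
    = (a.flatMap (fun p => b.map (fun q => (p.1 - q.1, p.2 - q.2)))).foldl
        (fun (rd : Int × PySem.Dict (Int × Int) Int) k =>
          let d := rd.2.insert k (rd.2.getD k 0 + 1)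
          (max rd.1 (d.getD k 0), d)) rd0 := by
  rw [List.foldl_flatMap]
  apply PySem.List.foldl_congr_mem
  intro acc x _
  rw [List.foldl_map]

lemma loopA2_res (rest : List (Int × Int)) : ∀ (seen : List (Int × Int)) (res : Int)
    (d : PySem.Dict (Int × Int) Int), (∀ k, d.getD k 0 = (seen.count k : Int)) →
    (rest.foldl (fun (rd : Int × PySem.Dict (Int × Int) Int) k =>
        let d := rd.2.insert k (rd.2.getD k 0 + 1)
        (max rd.1 (d.getD k 0), d)) (res, d)).1
    = (ovIncs seen rest).foldl max res := by
  induction rest with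
  | nil => intro seen res d _; simp [ovIncs]
  | cons k t ih =>
    intro seen res d hd
    simp only [List.foldl_cons, ovIncs]
    rw [PySem.Dict.getD_insert_self, hd k]
    rw [ih (seen ++ [k]) (max res ((seen.count k : Int) + 1)) _ ?_]
    intro j
    rw [PySem.Dict.getD_insert, List.count_append]
    split_ifs with hj
    · subst hj; simp
    · simp [hd, Ne.symm hj]

lemma ovIncs_le (rest : List (Int × Int)) : ∀ (seen : List (Int × Int)),
    ∀ x ∈ ovIncs seen rest, ∃ s ∈ rest, x ≤ (((seen ++ rest).count s : Nat) : Int) := by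
  induction rest with
  | nil => intro seen x hx; simp [ovIncs] at hx
  | cons k t ih =>
    intro seen x hx
    simp only [ovIncs, List.mem_cons] at hx
    rcases hx with rfl | hx
    · refine ⟨k, List.mem_cons_self, ?_⟩
      have : seen.count k + 1 ≤ (seen ++ k :: t).count k := by
        simp [List.count_append]
      exact_mod_cast this
    · obtain ⟨s, hs, hle⟩ := ih (seen ++ [k]) x hx
      refine ⟨s, List.mem_cons_of_mem _ hs, ?_⟩
      have : (seen ++ [k]) ++ t = seen ++ k :: t := by simp
      rwa [this] at hle

lemma ovIncs_ge (rest : List (Int × Int)) : ∀ (seen : List (Int × Int)) (s : Int × Int),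
    ((seen ++ rest).count s ≤ seen.count s) ∨
      ∃ x ∈ ovIncs seen rest, (((seen ++ rest).count s : Nat) : Int) ≤ x := by
  induction rest with
  | nil => intro seen s; left; simp
  | cons k t ih =>
    intro seen s
    have hassoc : (seen ++ [k]) ++ t = seen ++ k :: t := by simp
    rcases ih (seen ++ [k]) s with h | ⟨x, hx, hle⟩
    · rw [hassoc] at h
      by_cases hks : s = k
      · subst hks
        right
        refine ⟨(seen.count s : Int) + 1, by simp [ovIncs], ?_⟩
        have : (seen ++ s :: t).count s ≤ seen.count s + 1 := by
          have := h
          simp [List.count_append] at this ⊢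
          omega
        exact_mod_cast this
      · left
        have := h
        simp [List.count_append, Ne.symm hks] at this ⊢
        omega
    · right
      rw [hassoc] at hle
      exact ⟨x, by simp [ovIncs, List.mem_cons]; right; exact hx, hle⟩

lemma portA_closed (Aa Bb : List (List Int)) :
    largestOverlap Aa Bb
    = (ovIncs [] (ovL Aa Bb (Aa.length : Int)
        (((PySem.List.pyGet? Aa 0).getD []).length : Int))).foldl max 0 := by
  unfold largestOverlap
  simp only []
  rw [loopA_phase1]
  show (((ovOnes Aa _ _).foldl _ (0, PySem.Dict.empty))).1 = _
  rw [loopA2_flat]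
  rw [loopA2_res _ [] 0 _ (by intro k; simp)]
  rfl

lemma nodup_ovOnes (M : List (List Int)) (rows cols : Int) : (ovOnes M rows cols).Nodup :=
  List.Nodup.filter _ (nodup_ovCells rows cols)

lemma cast_sum_map {α : Type} (l : List α) (f : α → Nat) :
    (((l.map f).sum : Nat) : Int) = (l.map (fun x => ((f x : Nat) : Int))).sum := by
  induction l with
  | nil => simp
  | cons h t ih => simp [ih]

lemma countP_flatMap {α β : Type} (l : List α) (f : α → List β) (p : β → Bool) :
    (l.flatMap f).countP p = (l.map (fun x => (f x).countP p)).sum := by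
  induction l with
  | nil => simp
  | cons h t ih => simp [List.countP_append, ih]

lemma count_ovOnes (M : List (List Int)) (rows cols : Int) (q : Int × Int) :
    (ovOnes M rows cols).count q = if q ∈ ovOnes M rows cols then 1 else 0 := by
  split_ifs with h
  · exact List.count_eq_one_of_mem (nodup_ovOnes M rows cols) h
  · exact List.count_eq_zero.mpr h

lemma scan_eq_count (Aa Bb : List (List Int)) (rows cols dx dy : Int) :
    (PySem.List.pyRange 0 rows 1).foldl (fun cnt x =>
      (PySem.List.pyRange 0 cols 1).foldl (fun cnt y =>
        if ovVal Aa x y = 1 then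
          if 0 ≤ x - dx ∧ x - dx < rows ∧ 0 ≤ y - dy ∧ y - dy < cols ∧
              ovVal Bb (x - dx) (y - dy) = 1 then cnt + 1
          else cnt
        else cnt) cnt) 0
    = (((ovL Aa Bb rows cols).count (dx, dy) : Nat) : Int) := by
  -- the per-cell predicate of B's scan
  have inner : ∀ (x cnt : Int),
      (PySem.List.pyRange 0 cols 1).foldl (fun cnt y =>
        if ovVal Aa x y = 1 then
          if 0 ≤ x - dx ∧ x - dx < rows ∧ 0 ≤ y - dy ∧ y - dy < cols ∧
              ovVal Bb (x - dx) (y - dy) = 1 then cnt + 1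
          else cnt
        else cnt) cnt
      = cnt + ((PySem.List.pyRange 0 cols 1).countP (fun y =>
          decide (ovVal Aa x y = 1) &&
            decide ((x - dx, y - dy) ∈ ovOnes Bb rows cols)) : Int) := by
    intro x cnt
    rw [← PySem.List.foldl_if_add_one]
    apply PySem.List.foldl_congr_mem
    intro acc y _
    by_cases h1 : ovVal Aa x y = 1 <;>
      by_cases h2 : 0 ≤ x - dx ∧ x - dx < rows ∧ 0 ≤ y - dy ∧ y - dy < cols ∧
          ovVal Bb (x - dx) (y - dy) = 1 <;>
      simp [h1, h2, mem_ovOnes]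
  have outer : (PySem.List.pyRange 0 rows 1).foldl (fun cnt x =>
      (PySem.List.pyRange 0 cols 1).foldl (fun cnt y =>
        if ovVal Aa x y = 1 then
          if 0 ≤ x - dx ∧ x - dx < rows ∧ 0 ≤ y - dy ∧ y - dy < cols ∧
              ovVal Bb (x - dx) (y - dy) = 1 then cnt + 1
          else cnt
        else cnt) cnt) 0
      = (PySem.List.pyRange 0 rows 1).foldl (fun cnt x =>
          cnt + ((PySem.List.pyRange 0 cols 1).countP (fun y =>
            decide (ovVal Aa x y = 1) &&
              decide ((x - dx, y - dy) ∈ ovOnes Bb rows cols)) : Int)) 0 := by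
    apply PySem.List.foldl_congr_mem
    intro acc x _
    exact inner x acc
  rw [outer, PySem.List.foldl_add, zero_add]
  -- now compute the count in ovL
  have hL : (ovL Aa Bb rows cols).count (dx, dy)
      = ((ovOnes Aa rows cols).map (fun p =>
          (ovOnes Bb rows cols).count (p.1 - dx, p.2 - dy))).sum := by
    rw [List.count_eq_countP (l := ovL Aa Bb rows cols), ovL, countP_flatMap]
    congr 1
    apply List.map_congr_left
    intro p _
    rw [List.countP_map]
    rw [List.countP_congr (q := fun q => q == (p.1 - dx, p.2 - dy)) ?_]
    · exact List.count_eq_countP.symm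
    · rintro ⟨q1, q2⟩ _
      simp [Prod.ext_iff]
      constructor
      · rintro ⟨e1, e2⟩; omega
      · rintro ⟨e1, e2⟩; omega
  rw [hL, cast_sum_map]
  have hstep : ((ovOnes Aa rows cols).map (fun p : Int × Int =>
      (((ovOnes Bb rows cols).count (p.1 - dx, p.2 - dy) : Nat) : Int))).sum
      = ((ovOnes Aa rows cols).countP (fun p =>
          decide ((p.1 - dx, p.2 - dy) ∈ ovOnes Bb rows cols)) : Int) := by
    rw [← PySem.List.sum_map_ite_one_zero]
    congr 1
    apply List.map_congr_left
    intro p _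
    rw [count_ovOnes]
    split_ifs with h h' <;> simp_all
  rw [hstep]
  have hsplit : (ovOnes Aa rows cols).countP (fun p =>
        decide ((p.1 - dx, p.2 - dy) ∈ ovOnes Bb rows cols))
      = ((PySem.List.pyRange 0 rows 1).map (fun x => (PySem.List.pyRange 0 cols 1).countP
          (fun y => decide (ovVal Aa x y = 1) &&
            decide ((x - dx, y - dy) ∈ ovOnes Bb rows cols)))).sum := by
    rw [show ovOnes Aa rows cols
        = (ovCells rows cols).filter (fun p => ovVal Aa p.1 p.2 == 1) from rfl,
      List.countP_filter, ovCells, countP_flatMap]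
    congr 1
    apply List.map_congr_left
    intro x _
    rw [List.countP_map]
    apply List.countP_congr
    intro y _
    by_cases h1 : ovVal Aa x y = 1 <;>
      by_cases h2 : (x - dx, y - dy) ∈ ovOnes Bb rows cols <;>
      simp [h1, h2]
  rw [hsplit, cast_sum_map]

lemma mem_ovGrid {rows cols : Int} {s : Int × Int} :
    s ∈ ovGrid rows cols ↔
      -(rows - 1) ≤ s.1 ∧ s.1 < rows ∧ -(cols - 1) ≤ s.2 ∧ s.2 < cols := by
  obtain ⟨a, b⟩ := s
  simp [ovGrid, List.mem_flatMap, PySem.List.mem_pyRange_one]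
  tauto

lemma mem_ovGrid_of_mem_ovL {Aa Bb : List (List Int)} {rows cols : Int} {s : Int × Int}
    (h : s ∈ ovL Aa Bb rows cols) : s ∈ ovGrid rows cols := by
  rw [ovL] at h
  simp only [List.mem_flatMap, List.mem_map] at h
  obtain ⟨p, hp, q, hq, rfl⟩ := h
  rw [mem_ovOnes] at hp hq
  rw [mem_ovGrid]
  constructor
  · omega
  constructor
  · omega
  constructor
  · omega
  · omega

lemma portB_closed (Aa Bb : List (List Int)) :
    largestOverlap_alt Aa Bb
    = ((ovGrid (Aa.length : Int) (((PySem.List.pyGet? Aa 0).getD []).length : Int)).map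
        (fun s => (((ovL Aa Bb (Aa.length : Int)
          (((PySem.List.pyGet? Aa 0).getD []).length : Int)).count s : Nat) : Int))).foldl max 0 := by
  unfold largestOverlap_alt
  simp only []
  rw [ovGrid, List.foldl_map, List.foldl_flatMap]
  apply PySem.List.foldl_congr_mem
  intro acc dx _
  rw [List.foldl_map]
  apply PySem.List.foldl_congr_mem
  intro acc2 dy _
  rw [← scan_eq_count Aa Bb]
  rfl

lemma ports_eq (Aa Bb : List (List Int)) : largestOverlap Aa Bb = largestOverlap_alt Aa Bb := by
  rw [portA_closed, portB_closed]
  set rows := (Aa.length : Int) with hr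
  set cols := (((PySem.List.pyGet? Aa 0).getD []).length : Int) with hc
  set L := ovL Aa Bb rows cols with hLdef
  set G := ovGrid rows cols with hGdef
  apply le_antisymm
  · rcases PySem.List.foldl_max_mem (ovIncs [] L) 0 with h | h
    · rw [h]
      exact (PySem.List.le_foldl_max _ _).1
    · obtain ⟨s, hs, hle⟩ := ovIncs_le L [] _ h
      simp only [List.nil_append] at hle
      have hsG : s ∈ G := mem_ovGrid_of_mem_ovL hs
      have hmem : ((L.count s : Nat) : Int) ∈ G.map (fun s => ((L.count s : Nat) : Int)) :=
        List.mem_map_of_mem hsG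

      exact le_trans hle ((PySem.List.le_foldl_max _ _).2 _ hmem)
  · rcases PySem.List.foldl_max_mem (G.map (fun s => ((L.count s : Nat) : Int))) 0 with h | h
    · rw [h]
      exact (PySem.List.le_foldl_max _ _).1
    · rw [List.mem_map] at h
      obtain ⟨s, _, hval⟩ := h
      rcases ovIncs_ge L [] s with hz | ⟨x, hx, hle⟩
      · simp only [List.nil_append, List.count_nil, Nat.le_zero] at hz
        rw [← hval, hz]
        exact (PySem.List.le_foldl_max _ _).1
      · simp only [List.nil_append] at hle
        rw [← hval]
        exact le_trans hle ((PySem.List.le_foldl_max _ _).2 _ hx)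

-- ===== VERDICT (by name: the statement is the Claim_ definition above) =====
theorem largestOverlap_spec : Claim_equal_largestOverlap := by
  intro A B _ _
  unfold Spec_largestOverlap
  exact ports_eq A B
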